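-- pv_equiv track=rewrite | github.com/pypi-data/pypi-mirror-245 | packages/methylartist/methylartist-1.2.8-py3-none-any.whl/testing/modbam/parser.py | split_ml
-- ===== SOURCE A (Python) =====
-- def split_ml(mod_strings, ml):
--     mls = []
--
--     total_ms = sum([len(ms.split(',')[1:]) for ms in mod_strings])
--
--     assert total_ms == len(ml), 'mod bam formatting error'
--
--     i = 0
--     for mod_string in mod_strings:
--         m = mod_string.split(',')[1:] # discard first item (desc of mod base)
--         mls.append(ml[i:i+len(m)])
--         i += len(m)
--
--         assert len(m) == len(mls[-1]), 'mod bam formatting error'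
--
--     return mls
-- ===== SOURCE B (Python) =====
-- def split_ml(mod_strings, ml):
--     # distribute ml in one pass over its elements, filling chunks against a
--     # queue of target sizes, instead of slicing by index
--     pending = [len(ms.split(',')) - 1 for ms in mod_strings]
--     assert sum(pending) == len(ml), 'mod bam formatting error'
--     out, chunk = [], []
--     for x in ml:
--         while pending and len(chunk) == pending[0]:
--             out.append(chunk)
--             chunk = []
--             pending.pop(0)
--         chunk.append(x)
--     while pending:
--         out.append(chunk)
--         chunk = []
--         pending.pop(0)
--     return out
-- ===== Notes on version B (the rewrite author's own statement) =====
-- stated objective: alternative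
-- what changed: B never slices: it makes a single pass over ml, distributing each element into the current chunk and advancing through a queue of target chunk sizes (flushing finished and zero-size chunks as it goes), whereas A loops over mod_strings taking ml[i:i+len(m)] slices with a running index.
import Mathlib
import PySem

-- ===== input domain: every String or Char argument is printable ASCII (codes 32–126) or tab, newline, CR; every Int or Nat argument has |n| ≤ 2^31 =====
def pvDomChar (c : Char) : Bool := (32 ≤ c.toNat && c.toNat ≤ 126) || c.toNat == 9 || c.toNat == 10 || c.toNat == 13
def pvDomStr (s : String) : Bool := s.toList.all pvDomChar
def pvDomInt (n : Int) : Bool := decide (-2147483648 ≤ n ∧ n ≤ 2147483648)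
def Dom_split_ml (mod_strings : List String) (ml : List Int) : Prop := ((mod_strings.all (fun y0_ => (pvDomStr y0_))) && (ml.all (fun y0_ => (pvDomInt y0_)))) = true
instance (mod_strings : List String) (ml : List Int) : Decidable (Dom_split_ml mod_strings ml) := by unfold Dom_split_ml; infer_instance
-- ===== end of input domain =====

-- B replaces A's slice-per-mod_string loop by a single pass over ml that distributes
-- elements into chunks against a queue of target sizes (alternative decomposition, same cost).


-- ===== PORT A =====
-- shared helper: ms.split(',')  (sep is nonempty, so split? is always `some`)
def pvSplitComma (ms : String) : List String := (PySem.Str.split? ms ",").getD []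

-- the asserts cannot fire inside Pre_split_ml; the loop is the foldl carrying (mls, i)
def split_ml (mod_strings : List String) (ml : List Int) : List (List Int) :=
  (mod_strings.foldl
    (fun (st : List (List Int) × Nat) mod_string =>
      let m := (pvSplitComma mod_string).drop 1
      (st.1 ++ [PySem.List.slice ml (some (st.2 : Int)) (some ((st.2 : Int) + (m.length : Int)))],
       st.2 + m.length))
    ([], 0)).1

-- ===== PORT B =====
-- the inner `while pending and len(chunk) == pending[0]` loop (structural on pending)
def pvFlush (out : List (List Int)) (chunk : List Int) (pending : List Nat) :
    List (List Int) × List Int × List Nat :=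
  match pending with
  | [] => (out, chunk, [])
  | n :: ps => if chunk.length = n then pvFlush (out ++ [chunk]) [] ps else (out, chunk, n :: ps)

-- the trailing `while pending` loop
def pvPad (out : List (List Int)) (chunk : List Int) (pending : List Nat) : List (List Int) :=
  match pending with
  | [] => out
  | _ :: ps => pvPad (out ++ [chunk]) [] ps

def split_ml_alt (mod_strings : List String) (ml : List Int) : List (List Int) :=
  let pending := mod_strings.map (fun ms => (pvSplitComma ms).length - 1)
  let st := ml.foldl
    (fun (st : List (List Int) × List Int × List Nat) x =>
      let st' := pvFlush st.1 st.2.1 st.2.2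
      (st'.1, st'.2.1 ++ [x], st'.2.2))
    ([], [], pending)
  pvPad st.1 st.2.1 st.2.2

-- ===== PRECONDITION & SPEC =====
-- Pre_: A's (and B's) assert 'mod bam formatting error' raises unless the summed
-- per-mod-string chunk lengths equal len(ml); exactly those inputs are excluded.
def Pre_split_ml (mod_strings : List String) (ml : List Int) : Prop :=
  (mod_strings.map (fun ms => ((pvSplitComma ms).drop 1).length)).sum = ml.length
instance (mod_strings : List String) (ml : List Int) : Decidable (Pre_split_ml mod_strings ml) := by unfold Pre_split_ml; infer_instance
def pvWitness_split_ml : List String × List Int := (["C+m,1,3"], [5, 7])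

def Spec_split_ml (mod_strings : List String) (ml : List Int) (out : List (List Int)) : Prop := out = split_ml_alt mod_strings ml
instance (mod_strings : List String) (ml : List Int) (out : List (List Int)) : Decidable (Spec_split_ml mod_strings ml out) := by unfold Spec_split_ml; infer_instance

-- ===== CLAIM (what is proved, stated in full; the proofs are below) =====
def Claim_equal_split_ml : Prop := ∀ (mod_strings : List String) (ml : List Int), Dom_split_ml mod_strings ml → Pre_split_ml mod_strings ml → Spec_split_ml mod_strings ml (split_ml mod_strings ml)

-- ===== LEMMAS AND PROOFS =====

-- canonical result: consecutive chunks of the given sizes cut from a list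
def chunksOf : List Nat → List Int → List (List Int)
  | [], _ => []
  | n :: ps, l => l.take n :: chunksOf ps (l.drop n)

-- canonical result in A's offset form
def pvGo (ml : List Int) : List Nat → Nat → List (List Int)
  | [], _ => []
  | n :: ls, i => (ml.drop i).take n :: pvGo ml ls (i + n)

theorem splitA_loop (ml : List Int) (ss : List String) (acc : List (List Int)) (i : Nat) :
    (ss.foldl
      (fun (st : List (List Int) × Nat) mod_string =>
        let m := (pvSplitComma mod_string).drop 1
        (st.1 ++ [PySem.List.slice ml (some (st.2 : Int)) (some ((st.2 : Int) + (m.length : Int)))],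
         st.2 + m.length))
      (acc, i)).1
      = acc ++ pvGo ml (ss.map (fun ms => ((pvSplitComma ms).drop 1).length)) i := by
  induction ss generalizing acc i with
  | nil => simp [pvGo]
  | cons s ss ih =>
    simp only [List.foldl_cons, List.map_cons, pvGo]
    rw [ih]
    rw [PySem.List.slice_natCast_add]
    simp

theorem pvGo_eq_chunksOf (ml : List Int) (ls : List Nat) (i : Nat) :
    pvGo ml ls i = chunksOf ls (ml.drop i) := by
  induction ls generalizing i with
  | nil => simp [pvGo, chunksOf]
  | cons n ls ih =>
    simp only [pvGo, chunksOf, ih, List.drop_drop]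


-- trailing flush when only zero-size chunks remain
theorem pvPad_zeros (ps : List Nat) (out : List (List Int)) (h : ps.sum = 0) :
    pvPad out [] ps = out ++ chunksOf ps [] := by
  induction ps generalizing out with
  | nil => simp [pvPad, chunksOf]
  | cons n ps ih =>
    have hn : n = 0 := by
      simp [List.sum_cons] at h; omega
    have hs : ps.sum = 0 := by
      simp [List.sum_cons] at h; omega
    simp [pvPad, chunksOf, hn, ih _ hs]

-- invariant of B's pass over ml: with chunk a prefix of the current chunk and the
-- element count matching the remaining sizes, the fold+pad yields the chunks of chunk ++ xs
theorem runB (xs : List Int) : ∀ (ps : List Nat) (chunk : List Int) (out : List (List Int)),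
    xs.length + chunk.length = ps.sum →
    (∀ n ps', ps = n :: ps' → chunk.length ≤ n) →
    (let st := xs.foldl
        (fun (st : List (List Int) × List Int × List Nat) x =>
          let st' := pvFlush st.1 st.2.1 st.2.2
          (st'.1, st'.2.1 ++ [x], st'.2.2))
        (out, chunk, ps)
     pvPad st.1 st.2.1 st.2.2) = out ++ chunksOf ps (chunk ++ xs) := by
  induction xs with
  | nil =>
    intro ps chunk out hsum hle
    match ps with
    | [] =>
      simp at hsum
      simp [pvPad, chunksOf, hsum]
    | n :: ps' =>
      have hle' := hle n ps' rfl
      simp [List.sum_cons] at hsum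
      have hcn : chunk.length = n := by omega
      have hz : ps'.sum = 0 := by omega
      simp only [List.foldl_nil, pvPad]
      rw [pvPad_zeros ps' _ hz]
      simp [chunksOf, hcn, List.take_of_length_le, List.drop_of_length_le]
  | cons x xs ihx =>
    intro ps chunk out
    -- inner induction on ps: the flush cascade shrinks ps keeping x :: xs fixed
    induction ps generalizing chunk out with
    | nil => intro hsum _; simp at hsum
    | cons n ps' ihp =>
      intro hsum hle
      have hle' := hle n ps' rfl
      by_cases hc : chunk.length = n
      · -- flush: emit chunk, continue with ps'
        have hstep : pvFlush out chunk (n :: ps') = pvFlush (out ++ [chunk]) [] ps' := by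
          simp [pvFlush, hc]
        have h1 : chunksOf (n :: ps') (chunk ++ x :: xs) =
            chunk :: chunksOf ps' (x :: xs) := by
          simp [chunksOf, ← hc]
        have hsum' : (x :: xs).length + ([] : List Int).length = ps'.sum := by
          simp [List.sum_cons] at hsum ⊢; omega
        have h2 := ihp ([]) (out ++ [chunk]) hsum' (by intro a b h; simp)
        simp only [List.foldl_cons] at h2 ⊢
        rw [hstep, h1]
        simpa [List.append_assoc] using h2
      · -- no flush: append x to chunk
        have hstep : pvFlush out chunk (n :: ps') = (out, chunk, n :: ps') := by
          simp [pvFlush, hc]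
        have hsum' : xs.length + (chunk ++ [x]).length = (n :: ps').sum := by
          simp [List.sum_cons] at hsum ⊢; omega
        have hle2 : ∀ m ps2, (n :: ps') = m :: ps2 → (chunk ++ [x]).length ≤ m := by
          intro m ps2 h; cases h; simp; omega
        have h2 := ihx (n :: ps') (chunk ++ [x]) out hsum' hle2
        simp only [List.foldl_cons] at h2 ⊢
        rw [hstep]
        simpa [List.append_assoc] using h2

-- ===== VERDICT (by name: the statement is the Claim_ definition above) =====
theorem split_ml_spec : Claim_equal_split_ml := by
  intro mod_strings ml _ hpre
  simp only [Spec_split_ml, split_ml, split_ml_alt]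
  rw [splitA_loop ml mod_strings [] 0]
  simp only [List.nil_append, pvGo_eq_chunksOf, List.drop_zero]
  have hlens : mod_strings.map (fun ms => (pvSplitComma ms).length - 1)
      = mod_strings.map (fun ms => ((pvSplitComma ms).drop 1).length) := by
    simp
  rw [hlens]
  have := runB ml (mod_strings.map (fun ms => ((pvSplitComma ms).drop 1).length)) [] []
    (by simpa [Pre_split_ml] using hpre.symm)
    (by intro n ps' h; simp)
  exact this.symm
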